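-- pv_equiv track=rewrite | github.com/Ellsom1945/Routing-problem--CVRP | GASA2.py | va
-- ===== SOURCE A (Python) =====
-- def va(distmat, list1, maxlength, weight, things):
--     s = 0
--     w = weight
--     ml = maxlength
--     tlist = list(list1)
--     tlist.insert(0, 0)
--     for i in range(0, len(tlist) - 1):
--         w = w - things[tlist[i + 1]]
--         ml = ml - distmat[tlist[i]][tlist[i + 1]]
--         if (w < 0 or ml - distmat[tlist[i + 1]][0] < 0):  # 已超过最大运输距离或货物不足，返回
--             s += distmat[tlist[i]][0] + distmat[0][tlist[i + 1]]
--             w = weight - things[tlist[i + 1]]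
--             ml = maxlength - distmat[0][tlist[i + 1]]
--         else:
--             # 计算到K城市的距离
--             s += distmat[tlist[i]][tlist[i + 1]]
--     s += distmat[tlist[-1]][0]
--     return s
-- ===== SOURCE B (Python) =====
-- def va(distmat, list1, maxlength, weight, things):
--     # Pass 1: split list1 into maximal runs served before a forced return to depot,
--     # carrying the same (w, ml) state as the original scan.
--     routes = []
--     cur = []
--     w = weight
--     ml = maxlength
--     prev = 0
--     for node in list1:
--         w -= things[node]
--         ml -= distmat[prev][node]
--         if w < 0 or ml - distmat[node][0] < 0:
--             routes.append(cur)
--             cur = [node]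
--             w = weight - things[node]
--             ml = maxlength - distmat[0][node]
--         else:
--             cur.append(node)
--         prev = node
--     routes.append(cur)
--     # Pass 2: each run costs depot-out + internal legs + depot-back
--     # (an empty run is a depot-to-depot leg).
--     total = 0
--     for r in routes:
--         if r:
--             total += distmat[0][r[0]] + distmat[r[-1]][0]
--             for a, b in zip(r, r[1:]):
--                 total += distmat[a][b]
--         else:
--             total += distmat[0][0]
--     return total
-- ===== Notes on version B (the rewrite author's own statement) =====
-- stated objective: alternative
-- what changed: A accumulates the cost in one stateful indexed scan; B first splits the customer list into depot-bounded sub-routes using the same break rule, then totals each sub-route's cost (depot-out + internal legs + depot-back) in a separate pass.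
import Mathlib
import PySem

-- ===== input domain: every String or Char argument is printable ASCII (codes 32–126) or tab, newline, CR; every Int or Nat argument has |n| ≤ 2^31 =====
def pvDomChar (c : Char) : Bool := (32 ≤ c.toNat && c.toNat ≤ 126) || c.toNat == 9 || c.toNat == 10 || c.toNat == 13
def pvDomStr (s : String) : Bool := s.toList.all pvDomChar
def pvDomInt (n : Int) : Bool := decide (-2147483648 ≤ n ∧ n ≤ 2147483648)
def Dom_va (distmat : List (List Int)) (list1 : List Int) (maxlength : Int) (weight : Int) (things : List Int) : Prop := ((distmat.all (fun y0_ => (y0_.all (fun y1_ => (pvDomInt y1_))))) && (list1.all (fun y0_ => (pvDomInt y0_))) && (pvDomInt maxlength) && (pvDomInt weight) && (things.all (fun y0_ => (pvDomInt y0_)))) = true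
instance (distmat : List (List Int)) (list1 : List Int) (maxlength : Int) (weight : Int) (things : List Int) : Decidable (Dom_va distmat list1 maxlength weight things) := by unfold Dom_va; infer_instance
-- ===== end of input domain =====

-- B replaces A's single stateful cost scan by two passes — split the customer list
-- into depot-bounded sub-routes with the same (w, ml) break rule, then total each
-- sub-route's cost separately (objective: alternative decomposition, same O(n) cost).

-- ===== PORT A =====
-- shared indexing helpers (Python's distmat[a][b] and things[x], exact while in range)
def pvDist (distmat : List (List Int)) (a b : Int) : Int :=
  PySem.List.pyGetD (PySem.List.pyGetD distmat a []) b 0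
def pvThing (things : List Int) (x : Int) : Int :=
  PySem.List.pyGetD things x 0

def va (distmat : List (List Int)) (list1 : List Int) (maxlength : Int) (weight : Int) (things : List Int) : Int :=
  -- tlist = list(list1); tlist.insert(0, 0)
  let tlist : List Int := 0 :: list1
  -- for i in range(0, len(tlist) - 1): carrying (s, w, ml)
  let st := (PySem.List.pyRange 0 ((tlist.length : Int) - 1)).foldl
    (fun (acc : Int × Int × Int) i =>
      let s := acc.1; let w := acc.2.1; let ml := acc.2.2
      let cur := PySem.List.pyGetD tlist i 0
      let nxt := PySem.List.pyGetD tlist (i + 1) 0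
      let w2 := w - pvThing things nxt
      let ml2 := ml - pvDist distmat cur nxt
      if w2 < 0 ∨ ml2 - pvDist distmat nxt 0 < 0 then
        (s + pvDist distmat cur 0 + pvDist distmat 0 nxt,
         weight - pvThing things nxt,
         maxlength - pvDist distmat 0 nxt)
      else
        (s + pvDist distmat cur nxt, w2, ml2))
    (0, weight, maxlength)
  -- s += distmat[tlist[-1]][0]
  st.1 + pvDist distmat (PySem.List.pyGetD tlist (-1) 0) 0

-- ===== PORT B =====
-- cost of one sub-route r, added onto the running total (B's pass-2 loop body)
def vaRouteCost (distmat : List (List Int)) (total : Int) (r : List Int) : Int :=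
  if r ≠ [] then
    let t := total + pvDist distmat 0 (PySem.List.pyGetD r 0 0)
                   + pvDist distmat (PySem.List.pyGetD r (-1) 0) 0
    (r.zip (PySem.List.slice r (some 1) none)).foldl
      (fun t p => t + pvDist distmat p.1 p.2) t
  else
    total + pvDist distmat 0 0

def va_alt (distmat : List (List Int)) (list1 : List Int) (maxlength : Int) (weight : Int) (things : List Int) : Int :=
  -- pass 1: state (routes, cur, w, ml, prev)
  let fin := list1.foldl
    (fun (acc : List (List Int) × List Int × Int × Int × Int) node =>
      let routes := acc.1; let cur := acc.2.1
      let w := acc.2.2.1; let ml := acc.2.2.2.1; let prev := acc.2.2.2.2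
      let w2 := w - pvThing things node
      let ml2 := ml - pvDist distmat prev node
      if w2 < 0 ∨ ml2 - pvDist distmat node 0 < 0 then
        (routes ++ [cur], [node],
         weight - pvThing things node, maxlength - pvDist distmat 0 node, node)
      else
        (routes, cur ++ [node], w2, ml2, node))
    ([], [], weight, maxlength, 0)
  -- pass 2
  (fin.1 ++ [fin.2.1]).foldl (vaRouteCost distmat) 0

-- ===== PRECONDITION & SPEC =====
-- Pre_va = the inputs where every index A touches is in Python range (possibly
-- negative, which Python wraps and both ports wrap identically via pyGetD);
-- outside it A raises IndexError.
def Pre_va (distmat : List (List Int)) (list1 : List Int) (maxlength : Int) (weight : Int) (things : List Int) : Prop :=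
  distmat ≠ [] ∧
  (∀ row ∈ distmat, PySem.Raise.InRange row.length 0 ∧
      ∀ x ∈ list1, PySem.Raise.InRange row.length x) ∧
  (∀ x ∈ list1, PySem.Raise.InRange distmat.length x ∧
      PySem.Raise.InRange things.length x)
instance (distmat : List (List Int)) (list1 : List Int) (maxlength : Int) (weight : Int) (things : List Int) : Decidable (Pre_va distmat list1 maxlength weight things) := by unfold Pre_va; infer_instance

def pvWitness_va : List (List Int) × List Int × Int × Int × List Int :=
  ([[0, 4, 6], [4, 0, 3], [6, 3, 0]], [1, 2, -1], 10, 5, [0, 2, 3])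

def Spec_va (distmat : List (List Int)) (list1 : List Int) (maxlength : Int) (weight : Int) (things : List Int) (out : Int) : Prop := out = va_alt distmat list1 maxlength weight things
instance (distmat : List (List Int)) (list1 : List Int) (maxlength : Int) (weight : Int) (things : List Int) (out : Int) : Decidable (Spec_va distmat list1 maxlength weight things out) := by unfold Spec_va; infer_instance

-- ===== CLAIM (what is proved, stated in full; the proofs are below) =====
def Claim_equal_va : Prop := ∀ (distmat : List (List Int)) (list1 : List Int) (maxlength : Int) (weight : Int) (things : List Int), Dom_va distmat list1 maxlength weight things → Pre_va distmat list1 maxlength weight things → Spec_va distmat list1 maxlength weight things (va distmat list1 maxlength weight things)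

-- ===== LEMMAS AND PROOFS =====

-- common reference form of the scan: structural recursion over (prev, rest)
def loopA (dm : List (List Int)) (th : List Int) (wt mx : Int) : Int → List Int → Int → Int → Int → Int
  | prev, [], s, _, _ => s + pvDist dm prev 0
  | prev, x :: xs, s, w, ml =>
      if w - pvThing th x < 0 ∨ ml - pvDist dm prev x - pvDist dm x 0 < 0 then
        loopA dm th wt mx x xs (s + pvDist dm prev 0 + pvDist dm 0 x)
          (wt - pvThing th x) (mx - pvDist dm 0 x)
      else
        loopA dm th wt mx x xs (s + pvDist dm prev x)
          (w - pvThing th x) (ml - pvDist dm prev x)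


-- fold body of va's loop, seen as a function of the pair (tlist[i], tlist[i+1])
def stepA (dm : List (List Int)) (th : List Int) (wt mx : Int)
    (acc : Int × Int × Int) (p : Int × Int) : Int × Int × Int :=
  if acc.2.1 - pvThing th p.2 < 0 ∨
     acc.2.2 - pvDist dm p.1 p.2 - pvDist dm p.2 0 < 0 then
    (acc.1 + pvDist dm p.1 0 + pvDist dm 0 p.2, wt - pvThing th p.2, mx - pvDist dm 0 p.2)
  else
    (acc.1 + pvDist dm p.1 p.2, acc.2.1 - pvThing th p.2, acc.2.2 - pvDist dm p.1 p.2)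

lemma range_pairs (x : Int) (xs : List Int) :
    (List.range xs.length).map
      (fun k => ((x :: xs).getD k 0, (x :: xs).getD (k + 1) 0)) = (x :: xs).zip xs := by
  induction xs generalizing x with
  | nil => simp
  | cons y ys ih =>
    rw [List.length_cons, List.range_succ_eq_map, List.map_cons, List.map_map,
      List.zip_cons_cons, ← ih y]
    simp [Function.comp_def]

lemma pyRange_pairs (x : Int) (xs : List Int) :
    (PySem.List.pyRange 0 ((xs.length : Int))).map
      (fun i => (PySem.List.pyGetD (x :: xs) i 0, PySem.List.pyGetD (x :: xs) (i + 1) 0))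
      = (x :: xs).zip xs := by
  rw [PySem.List.pyRange_zero_natCast, List.map_map]
  rw [← range_pairs x xs]
  apply List.map_congr_left
  intro k _
  have h1 : ((k : Int) + 1) = ((k + 1 : Nat) : Int) := by push_cast; ring
  simp only [Function.comp_def, h1, PySem.List.pyGetD_natCast]

lemma fold_pairs_eq_loopA (dm : List (List Int)) (th : List Int) (wt mx : Int) :
    ∀ (xs : List Int) (prev s w ml : Int),
      (((prev :: xs).zip xs).foldl (stepA dm th wt mx) (s, w, ml)).1
          + pvDist dm ((prev :: xs).getLast (by simp)) 0
        = loopA dm th wt mx prev xs s w ml := by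
  intro xs
  induction xs with
  | nil => intro prev s w ml; simp [loopA]
  | cons x xs ih =>
    intro prev s w ml
    rw [List.zip_cons_cons, List.foldl_cons]
    have hlast : (prev :: x :: xs).getLast (by simp) = (x :: xs).getLast (by simp) := by
      simp [List.getLast]
    rw [loopA]
    by_cases hc : w - pvThing th x < 0 ∨ ml - pvDist dm prev x - pvDist dm x 0 < 0
    · rw [if_pos hc]
      have : stepA dm th wt mx (s, w, ml) (prev, x)
          = (s + pvDist dm prev 0 + pvDist dm 0 x, wt - pvThing th x, mx - pvDist dm 0 x) := by
        simp only [stepA]; rw [if_pos hc]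
      rw [this, hlast, ih]
    · rw [if_neg hc]
      have : stepA dm th wt mx (s, w, ml) (prev, x)
          = (s + pvDist dm prev x, w - pvThing th x, ml - pvDist dm prev x) := by
        simp only [stepA]; rw [if_neg hc]
      rw [this, hlast, ih]

lemma va_eq_loopA (dm : List (List Int)) (l : List Int) (mx wt : Int) (th : List Int) :
    va dm l mx wt th = loopA dm th wt mx 0 l 0 wt mx := by
  have h1 : va dm l mx wt th
      = ((PySem.List.pyRange 0 (((0 :: l).length : Int) - 1)).foldl
          (fun (acc : Int × Int × Int) i =>
            stepA dm th wt mx acc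
              (PySem.List.pyGetD (0 :: l) i 0, PySem.List.pyGetD (0 :: l) (i + 1) 0))
          (0, wt, mx)).1
        + pvDist dm (PySem.List.pyGetD (0 :: l) (-1) 0) 0 := rfl
  have hb : (((0 :: l).length : Int) - 1) = ((l.length : Int)) := by
    rw [List.length_cons]; push_cast; ring
  have key : (PySem.List.pyRange 0 ((l.length : Int))).foldl
        (fun (acc : Int × Int × Int) i =>
          stepA dm th wt mx acc
            (PySem.List.pyGetD (0 :: l) i 0, PySem.List.pyGetD (0 :: l) (i + 1) 0))
        (0, wt, mx)
      = ((0 :: l).zip l).foldl (stepA dm th wt mx) (0, wt, mx) := by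
    rw [← pyRange_pairs 0 l, List.foldl_map]
  rw [h1, hb, key, PySem.List.pyGetD_neg_one (0 :: l) 0 (by simp)]
  exact fold_pairs_eq_loopA dm th wt mx l 0 0 wt mx


-- ---------- B side ----------

-- fold body of va_alt's pass-1 scan, as a named function
def stepB (dm : List (List Int)) (th : List Int) (wt mx : Int)
    (acc : List (List Int) × List Int × Int × Int × Int) (node : Int) :
    List (List Int) × List Int × Int × Int × Int :=
  if acc.2.2.1 - pvThing th node < 0 ∨
     acc.2.2.2.1 - pvDist dm acc.2.2.2.2 node - pvDist dm node 0 < 0 then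
    (acc.1 ++ [acc.2.1], [node], wt - pvThing th node, mx - pvDist dm 0 node, node)
  else
    (acc.1, acc.2.1 ++ [node], acc.2.2.1 - pvThing th node,
     acc.2.2.2.1 - pvDist dm acc.2.2.2.2 node, node)

-- internal legs of a sub-route, and its cost with the closing depot leg removed
def legs0 (dm : List (List Int)) (r : List Int) : Int :=
  (r.zip r.tail).foldl (fun t p => t + pvDist dm p.1 p.2) 0

def openCost (dm : List (List Int)) (r : List Int) : Int :=
  if r = [] then 0 else pvDist dm 0 (PySem.List.pyGetD r 0 0) + legs0 dm r

lemma slice_tail (r : List Int) : PySem.List.slice r (some 1) none = r.tail := by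
  simp [pysem]

lemma loopA_add (dm : List (List Int)) (th : List Int) (wt mx : Int) :
    ∀ (xs : List Int) (prev s w ml : Int),
      loopA dm th wt mx prev xs s w ml = s + loopA dm th wt mx prev xs 0 w ml := by
  intro xs
  induction xs with
  | nil => intro prev s w ml; simp [loopA]
  | cons x xs ih =>
    intro prev s w ml
    rw [loopA, loopA]
    by_cases hc : w - pvThing th x < 0 ∨ ml - pvDist dm prev x - pvDist dm x 0 < 0
    · rw [if_pos hc, if_pos hc, ih, ih x (0 + pvDist dm prev 0 + pvDist dm 0 x)]
      ring
    · rw [if_neg hc, if_neg hc, ih, ih x (0 + pvDist dm prev x)]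
      ring

-- cost of one closed sub-route, given that it ends at prev (or is the initial empty run)
lemma routeCost_char (dm : List (List Int)) (t : Int) (cur : List Int) (prev : Int)
    (h0 : cur = [] → prev = 0) (h1 : ∀ h : cur ≠ [], cur.getLast h = prev) :
    vaRouteCost dm t cur = t + openCost dm cur + pvDist dm prev 0 := by
  by_cases hc : cur = []
  · subst hc
    rw [h0 rfl]
    simp [vaRouteCost, openCost]
  · rw [vaRouteCost, if_pos hc, openCost, if_neg hc]
    rw [slice_tail, PySem.List.pyGetD_neg_one cur 0 hc, h1 hc]
    rw [PySem.List.foldl_add, legs0, PySem.List.foldl_add]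
    ring

lemma zip_tail_snoc (c : Int) (cs : List Int) (x : Int) :
    ((c :: cs) ++ [x]).zip (((c :: cs) ++ [x]).tail)
      = (c :: cs).zip cs ++ [((c :: cs).getLast (by simp), x)] := by
  induction cs generalizing c with
  | nil => simp
  | cons d ds ih =>
    have : ((c :: d :: ds) ++ [x]).zip (((c :: d :: ds) ++ [x]).tail)
        = (c, d) :: ((d :: ds) ++ [x]).zip (((d :: ds) ++ [x]).tail) := by
      simp
    rw [this, ih d]
    simp

lemma openCost_snoc (dm : List (List Int)) (cur : List Int) (prev x : Int)
    (h0 : cur = [] → prev = 0) (h1 : ∀ h : cur ≠ [], cur.getLast h = prev) :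
    openCost dm (cur ++ [x]) = openCost dm cur + pvDist dm prev x := by
  by_cases hc : cur = []
  · subst hc
    rw [h0 rfl]
    simp [openCost, legs0, PySem.List.pyGetD_zero_cons]
  · obtain ⟨c, cs, rfl⟩ := List.exists_cons_of_ne_nil hc
    rw [openCost, if_neg (by simp), openCost, if_neg hc]
    have hleg : legs0 dm ((c :: cs) ++ [x]) = legs0 dm (c :: cs) + pvDist dm prev x := by
      rw [legs0, zip_tail_snoc, List.foldl_append, h1 hc]
      rfl
    rw [hleg]
    have hhead : PySem.List.pyGetD ((c :: cs) ++ [x]) 0 0 = PySem.List.pyGetD (c :: cs) 0 0 := by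
      simp [PySem.List.pyGetD_zero_cons]
    rw [hhead]
    ring

lemma scan_costs (dm : List (List Int)) (th : List Int) (wt mx : Int) :
    ∀ (rest : List Int) (routes : List (List Int)) (cur : List Int) (w ml prev : Int),
      (cur = [] → prev = 0) → (∀ h : cur ≠ [], cur.getLast h = prev) →
      ((rest.foldl (stepB dm th wt mx) (routes, cur, w, ml, prev)).1
          ++ [(rest.foldl (stepB dm th wt mx) (routes, cur, w, ml, prev)).2.1]).foldl
        (vaRouteCost dm) 0
      = routes.foldl (vaRouteCost dm) 0 + openCost dm cur
          + loopA dm th wt mx prev rest 0 w ml := by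
  intro rest
  induction rest with
  | nil =>
    intro routes cur w ml prev h0 h1
    rw [List.foldl_nil, List.foldl_append, List.foldl_cons, List.foldl_nil]
    rw [routeCost_char dm _ cur prev h0 h1, loopA]
    ring
  | cons x xs ih =>
    intro routes cur w ml prev h0 h1
    rw [List.foldl_cons, loopA]
    by_cases hc : w - pvThing th x < 0 ∨ ml - pvDist dm prev x - pvDist dm x 0 < 0
    · have hstep : stepB dm th wt mx (routes, cur, w, ml, prev) x
          = (routes ++ [cur], [x], wt - pvThing th x, mx - pvDist dm 0 x, x) := by
        simp only [stepB]; rw [if_pos hc]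
      rw [hstep, if_pos hc]
      rw [ih (routes ++ [cur]) [x] _ _ x (by intro h; cases h) (by intro h; rfl)]
      rw [List.foldl_append, List.foldl_cons, List.foldl_nil]
      rw [routeCost_char dm _ cur prev h0 h1]
      rw [loopA_add dm th wt mx xs x (0 + pvDist dm prev 0 + pvDist dm 0 x)]
      have hx : openCost dm [x] = pvDist dm 0 x := by
        simp [openCost, legs0]
      rw [hx]
      ring
    · have hstep : stepB dm th wt mx (routes, cur, w, ml, prev) x
          = (routes, cur ++ [x], w - pvThing th x, ml - pvDist dm prev x, x) := by
        simp only [stepB]; rw [if_neg hc]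
      rw [hstep, if_neg hc]
      rw [ih routes (cur ++ [x]) _ _ x (by intro h; simp at h)
        (by intro h; exact List.getLast_concat)]
      rw [openCost_snoc dm cur prev x h0 h1]
      rw [loopA_add dm th wt mx xs x (0 + pvDist dm prev x)]
      ring

lemma va_alt_eq_loopA (dm : List (List Int)) (l : List Int) (mx wt : Int) (th : List Int) :
    va_alt dm l mx wt th = loopA dm th wt mx 0 l 0 wt mx := by
  have h1 : va_alt dm l mx wt th
      = ((l.foldl (stepB dm th wt mx) ([], [], wt, mx, 0)).1
          ++ [(l.foldl (stepB dm th wt mx) ([], [], wt, mx, 0)).2.1]).foldl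
          (vaRouteCost dm) 0 := rfl
  rw [h1, scan_costs dm th wt mx l [] [] wt mx 0 (fun _ => rfl) (fun h => absurd rfl h)]
  simp [openCost]

-- ===== VERDICT (by name: the statement is the Claim_ definition above) =====
theorem va_spec : Claim_equal_va := by
  intro distmat list1 maxlength weight things _ _
  show va distmat list1 maxlength weight things = va_alt distmat list1 maxlength weight things
  rw [va_eq_loopA, va_alt_eq_loopA]
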